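-- pv_equiv track=rewrite | github.com/afiege/ai-consultant | backend/app/services/ai_participant.py | _parse_ideas
-- ===== SOURCE A (Python) =====
-- from typing import List, Optional, Dict
--
-- def _parse_ideas(content: str) -> List[str]:
--     """
--     Parse ideas from AI response.
--
--     Each idea spans two lines: a numbered title line followed by an
--     explanation sentence (possibly indented). Both are concatenated
--     into a single string separated by a space.
--
--     Returns:
--         List of ideas (each idea = title + " " + explanation)
--     """
--     ideas = []
--     lines = content.strip().split('\n')
--     i = 0
--     while i < len(lines):
--         line = lines[i].strip()
--         matched = False
--         for prefix in ['1.', '2.', '3.', '1)', '2)', '3)']: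
--             if line.startswith(prefix):
--                 title = line[len(prefix):].strip()
--                 # Look ahead for the explanation sentence (non-empty, non-numbered)
--                 explanation = ''
--                 j = i + 1
--                 while j < len(lines):
--                     next_line = lines[j].strip()
--                     if not next_line:
--                         j += 1
--                         continue
--                     # Stop if we hit the next numbered idea
--                     if next_line and next_line[0].isdigit():
--                         break
--                     explanation = next_line
--                     i = j  # advance past the explanation line
--                     break
--                 if title:
--                     idea = f"{title} {explanation}".strip() if explanation else title
--                     ideas.append(idea)
--                 matched = True
--                 break
--         i += 1
--
--     # Fallback: if structured parsing found nothing, grab non-empty lines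
--     if not ideas:
--         for line in lines:
--             line = line.strip()
--             if line and not line[0].isdigit():
--                 ideas.append(line)
--
--     return ideas
-- ===== SOURCE B (Python) =====
-- from typing import List
--
-- _HEADS = ('1.', '2.', '3.', '1)', '2)', '3)')
--
--
-- def _parse_ideas(content: str) -> List[str]:
--     """Segment-based parser: cut the stripped lines at header lines, then
--     process each segment independently."""
--     lines = [l.strip() for l in content.strip().split('\n')]
--
--     # Phase 1: indices of header lines.
--     starts = [k for k, l in enumerate(lines) if l[:2] in _HEADS]
--
--     # Phase 2: one idea per segment [start, end).
--     ideas = []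
--     ends = starts[1:] + [len(lines)]
--     for start, end in zip(starts, ends):
--         title = lines[start][2:].strip()
--         if not title:
--             continue
--         explanation = ''
--         for l in lines[start + 1:end]:
--             if l:
--                 if not l[0].isdigit():
--                     explanation = l
--                 break
--         ideas.append(f"{title} {explanation}".strip() if explanation else title)
--
--     if not ideas:
--         ideas = [l for l in lines if l and not l[0].isdigit()]
--     return ideas
-- ===== Notes on version B (the rewrite author's own statement) =====
-- stated objective: simpler
-- what changed: Replaces A's single index-mutating while loop with look-ahead and i=j jumps by a two-phase decomposition: first collect the header-line indices, then derive each idea independently from its segment (title from the header line, explanation from the segment's first non-empty line unless it starts with a digit), keeping the same fallback.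
import Mathlib
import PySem

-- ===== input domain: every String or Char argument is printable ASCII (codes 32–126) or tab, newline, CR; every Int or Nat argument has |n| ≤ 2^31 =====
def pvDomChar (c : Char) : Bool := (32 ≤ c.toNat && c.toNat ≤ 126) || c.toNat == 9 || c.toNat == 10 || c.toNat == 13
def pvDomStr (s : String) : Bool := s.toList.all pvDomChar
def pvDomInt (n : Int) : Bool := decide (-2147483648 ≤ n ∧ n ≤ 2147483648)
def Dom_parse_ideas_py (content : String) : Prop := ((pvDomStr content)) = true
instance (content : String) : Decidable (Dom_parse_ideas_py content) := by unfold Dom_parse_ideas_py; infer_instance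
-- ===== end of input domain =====

-- B replaces A's index-mutating while loop (with its i=j look-ahead jumps) by a two-phase
-- decomposition — collect header indices, then process each segment independently (simpler).

-- ===== PORT A =====
-- shared with B: `line[0].isdigit()` test (guarded by non-emptiness in both Pythons)
def pvDigit0 (s : String) : Bool := (PySem.Str.pyGet? s 0).elim false PySem.Chars.isdigit

-- the literal prefix list of A (B's `_HEADS` tuple holds the same six strings)
def pvHeads : List String := ["1.", "2.", "3.", "1)", "2)", "3)"]

-- A's `for prefix in [...]: if line.startswith(prefix): ... break`
def pvFindHead : List String → String → Option String
  | [], _ => none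
  | p :: ps, line => if PySem.Str.startswith line p then some p else pvFindHead ps line

-- A's inner `while j < len(lines)` look-ahead; returns (explanation, final i)
def pvLookA (lines : List String) (i j : Nat) : String × Nat :=
  if _h : j < lines.length then
    let nl := PySem.Str.strip (lines.getD j "")
    if nl = "" then pvLookA lines i (j + 1)
    else if pvDigit0 nl then ("", i)
    else (nl, j)
  else ("", i)
termination_by lines.length - j

theorem pvLookA_snd (lines : List String) (i j : Nat) :
    (pvLookA lines i j).2 = i ∨ j ≤ (pvLookA lines i j).2 := by
  fun_induction pvLookA lines i j with
  | case1 j _ nl _ ih => rcases ih with h | h <;> [left; right] <;> omega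
  | case2 => left; rfl
  | case3 => right; rfl
  | case4 => left; rfl

-- A's outer `while i < len(lines)` loop, producing the appended ideas in order
def pvLoopA (lines : List String) (i : Nat) : List String :=
  if _h : i < lines.length then
    let line := PySem.Str.strip (lines.getD i "")
    match pvFindHead pvHeads line with
    | some p =>
        let title := PySem.Str.strip (PySem.Str.slice line (some (PySem.Str.len p)) none)
        let r := pvLookA lines i (i + 1)
        (if title = "" then []
         else [if r.1 = "" then title
               else PySem.Str.strip (PySem.Str.join "" [title, " ", r.1])]) ++
          pvLoopA lines (r.2 + 1)
    | none => pvLoopA lines (i + 1)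
  else []
termination_by lines.length - i
decreasing_by
  · rcases pvLookA_snd lines i (i + 1) with h | h <;> omega
  · omega

-- A's fallback loop
def pvFallbackA : List String → List String
  | [] => []
  | l :: r =>
      let s := PySem.Str.strip l
      if (s != "") && !pvDigit0 s then s :: pvFallbackA r else pvFallbackA r

def parse_ideas_py (content : String) : List String :=
  let lines := (PySem.Str.split? (PySem.Str.strip content) "\n").getD []
  let ideas := pvLoopA lines 0
  if ideas = [] then pvFallbackA lines else ideas

-- ===== PORT B =====
-- B's `l[:2] in _HEADS`
def pvIsHead (l : String) : Bool := pvHeads.contains (PySem.Str.slice l none (some 2))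

-- B's `for l in segment: if l: (explanation unless digit); break`
def pvScanExpl : List String → String
  | [] => ""
  | l :: rest => if l = "" then pvScanExpl rest else if pvDigit0 l then "" else l

-- B's `for start, end in zip(starts, ends)` loop
def pvSegs (lines : List String) : List (Int × Int) → List String
  | [] => []
  | (s, e) :: rest =>
      let title := PySem.Str.strip (PySem.Str.slice (PySem.List.pyGetD lines s "") (some 2) none)
      if title = "" then pvSegs lines rest
      else
        let expl := pvScanExpl (PySem.List.slice lines (some (s + 1)) (some e))
        (if expl = "" then title
         else PySem.Str.strip (PySem.Str.join "" [title, " ", expl])) :: pvSegs lines rest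

def parse_ideas_py_alt (content : String) : List String :=
  let lines := ((PySem.Str.split? (PySem.Str.strip content) "\n").getD []).map PySem.Str.strip
  let starts := ((PySem.List.enumerate lines).filter (fun kl => pvIsHead kl.2)).map Prod.fst
  let ends := PySem.List.slice starts (some 1) none ++ [(lines.length : Int)]
  let ideas := pvSegs lines (List.zip starts ends)
  if ideas = [] then lines.filter (fun l => (l != "") && !pvDigit0 l) else ideas

-- ===== PRECONDITION & SPEC =====
def Spec_parse_ideas_py (content : String) (out : List String) : Prop := out = parse_ideas_py_alt content
instance (content : String) (out : List String) : Decidable (Spec_parse_ideas_py content out) := by unfold Spec_parse_ideas_py; infer_instance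

-- ===== CLAIM (what is proved, stated in full; the proofs are below) =====
def Claim_equal_parse_ideas_py : Prop := ∀ (content : String), Dom_parse_ideas_py content → Spec_parse_ideas_py content (parse_ideas_py content)

-- ===== LEMMAS AND PROOFS =====
-- proof-side: header positions of S starting at offset k (Nat-valued mirror of B's phase 1)
def pvStartsN : List String → Nat → List Nat
  | [], _ => []
  | l :: rest, k => if pvIsHead l then k :: pvStartsN rest (k + 1) else pvStartsN rest (k + 1)

-- proof-side: B's phase 2 with the explanation scanned on the unbounded tail
def pvSegU (S : List String) : List Nat → List String
  | [] => []
  | k :: rest =>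
      let title := PySem.Str.strip (PySem.Str.slice (S.getD k "") (some 2) none)
      if title = "" then pvSegU S rest
      else
        let expl := pvScanExpl (S.drop (k + 1))
        (if expl = "" then title
         else PySem.Str.strip (PySem.Str.join "" [title, " ", expl])) :: pvSegU S rest

theorem pvStartsN_mem (T : List String) (k x : Nat) (hx : x ∈ pvStartsN T k) :
    k ≤ x ∧ x - k < T.length ∧ pvIsHead (T.getD (x - k) "") = true := by
  induction T generalizing k with
  | nil => simp [pvStartsN] at hx
  | cons l rest ih =>
    simp only [pvStartsN] at hx
    by_cases hh : pvIsHead l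
    · rw [if_pos hh] at hx
      rcases List.mem_cons.mp hx with rfl | hx
      · simpa using hh
      · obtain ⟨h1, h2, h3⟩ := ih (k + 1) hx
        refine ⟨by omega, by simp only [List.length_cons]; omega, ?_⟩
        have hxk : x - k = (x - (k + 1)) + 1 := by omega
        rw [hxk]; simpa using h3
    · rw [if_neg hh] at hx
      obtain ⟨h1, h2, h3⟩ := ih (k + 1) hx
      refine ⟨by omega, by simp only [List.length_cons]; omega, ?_⟩
      have hxk : x - k = (x - (k + 1)) + 1 := by omega
      rw [hxk]; simpa using h3

theorem pvStartsN_pairwise (T : List String) (k : Nat) : (pvStartsN T k).Pairwise (· < ·) := by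
  induction T generalizing k with
  | nil => simp [pvStartsN]
  | cons l rest ih =>
    simp only [pvStartsN]
    split
    · exact List.Pairwise.cons (fun x hx => by have := (pvStartsN_mem rest (k+1) x hx).1; omega) (ih (k+1))
    · exact ih (k+1)

theorem pvStarts_cast (T : List String) (k : Nat) :
    ((PySem.List.enumerate T (k : Int)).filter (fun kl => pvIsHead kl.2)).map Prod.fst
      = (pvStartsN T k).map (Nat.cast : Nat → Int) := by
  induction T generalizing k with
  | nil => simp [pvStartsN, PySem.List.enumerate_nil]
  | cons l rest ih =>
    rw [PySem.List.enumerate_cons]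
    have hk1 : (k : Int) + 1 = ((k + 1 : Nat) : Int) := by push_cast; ring
    rw [hk1]
    simp only [pvStartsN, List.filter_cons]
    by_cases hh : pvIsHead l
    · rw [if_pos (show pvIsHead (((k:Nat) : Int), l).2 = true from hh), if_pos hh]
      rw [List.map_cons, List.map_cons, ih (k+1)]
    · rw [if_neg (show ¬ pvIsHead (((k:Nat) : Int), l).2 = true by simpa using hh), if_neg hh]
      exact ih (k+1)

theorem pvFallback_eq (R : List String) :
    pvFallbackA R = (R.map PySem.Str.strip).filter (fun l => (l != "") && !pvDigit0 l) := by
  induction R with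
  | nil => rfl
  | cons l r ih => simp only [pvFallbackA, List.map_cons, List.filter_cons]; split <;> simp_all

theorem pvDigit0_cons (c : Char) (t : List Char) (s : String) (h : s.toList = c :: t) :
    pvDigit0 s = PySem.Chars.isdigit c := by
  unfold pvDigit0
  rw [PySem.Str.pyGet?_eq, h]
  have : PySem.Chars.pyGet? (c :: t) 0 = some c := by
    show PySem.List.pyGet? (c :: t) 0 = some c
    simp [PySem.List.pyGet?, PySem.List.pyIdx?]
  rw [this]; rfl

theorem pvSlice2_toList (s : String) :
    (PySem.Str.slice s none (some 2)).toList = s.toList.take 2 := by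
  rw [PySem.Str.toList_slice]
  exact (PySem.List.slice_to (xs := s.toList) (b := 2) (by norm_num)).trans rfl

theorem pvTake2_shape (l : List Char) (c1 c2 : Char) (h : l.take 2 = [c1, c2]) :
    ∃ t, l = c1 :: t := by
  cases l with
  | nil => simp at h
  | cons a t => rw [List.take_succ_cons] at h; exact ⟨t, by rw [(List.cons.injEq .. |>.mp h).1]⟩

theorem pvHead_shape (s : String) (h : pvIsHead s = true) :
    ∃ c t, s.toList = c :: t ∧ PySem.Chars.isdigit c = true := by
  unfold pvIsHead at h
  have hmem := List.mem_of_elem_eq_true h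
  have htake := pvSlice2_toList s
  simp only [pvHeads, List.mem_cons, List.not_mem_nil, or_false] at hmem
  rcases hmem with he | he | he | he | he | he <;>
    rw [he] at htake <;>
    [ obtain ⟨t, ht⟩ := pvTake2_shape _ '1' '.' htake.symm;
      obtain ⟨t, ht⟩ := pvTake2_shape _ '2' '.' htake.symm;
      obtain ⟨t, ht⟩ := pvTake2_shape _ '3' '.' htake.symm;
      obtain ⟨t, ht⟩ := pvTake2_shape _ '1' ')' htake.symm;
      obtain ⟨t, ht⟩ := pvTake2_shape _ '2' ')' htake.symm;
      obtain ⟨t, ht⟩ := pvTake2_shape _ '3' ')' htake.symm] <;>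
    exact ⟨_, t, ht, by decide⟩
theorem pvHead_props (s : String) (h : pvIsHead s = true) : s ≠ "" ∧ pvDigit0 s = true := by
  obtain ⟨c, t, hct, hd⟩ := pvHead_shape s h
  constructor
  · intro rfl'; rw [rfl'] at hct; simp at hct
  · rw [pvDigit0_cons c t s hct, hd]
theorem pvStartswith_slice2 (l p : String) (hlen : p.toList.length = 2)
    (hsw : PySem.Str.startswith l p = true) : PySem.Str.slice l none (some 2) = p := by
  rw [PySem.Str.startswith_eq, PySem.Chars.startswith_iff] at hsw
  apply String.toList_inj.mp
  rw [pvSlice2_toList, ← hlen]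
  exact (List.prefix_iff_eq_take.mp hsw).symm

theorem pvSlice2_startswith (l p : String) (hsl : PySem.Str.slice l none (some 2) = p) :
    PySem.Str.startswith l p = true := by
  rw [PySem.Str.startswith_eq, PySem.Chars.startswith_iff]
  rw [← hsl]
  have := pvSlice2_toList l
  rw [this]
  exact List.take_prefix 2 l.toList

theorem pvFindHead_some (l p : String) (h : pvFindHead pvHeads l = some p) :
    pvIsHead l = true ∧ PySem.Str.len p = 2 ∧ PySem.Str.slice l none (some 2) = p := by
  simp only [pvHeads, pvFindHead] at h
  split_ifs at h with h1 h2 h3 h4 h5 h6 <;> rw [Option.some.injEq] at h <;> subst h <;>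
    refine ⟨?_, by decide, ?_⟩ <;>
    [ skip; exact pvStartswith_slice2 l _ (by decide) h1;
      skip; exact pvStartswith_slice2 l _ (by decide) h2;
      skip; exact pvStartswith_slice2 l _ (by decide) h3;
      skip; exact pvStartswith_slice2 l _ (by decide) h4;
      skip; exact pvStartswith_slice2 l _ (by decide) h5;
      skip; exact pvStartswith_slice2 l _ (by decide) h6]
  · unfold pvIsHead
    rw [pvStartswith_slice2 l _ (by decide) h1]
    decide
  · unfold pvIsHead
    rw [pvStartswith_slice2 l _ (by decide) h2]
    decide
  · unfold pvIsHead
    rw [pvStartswith_slice2 l _ (by decide) h3]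
    decide
  · unfold pvIsHead
    rw [pvStartswith_slice2 l _ (by decide) h4]
    decide
  · unfold pvIsHead
    rw [pvStartswith_slice2 l _ (by decide) h5]
    decide
  · unfold pvIsHead
    rw [pvStartswith_slice2 l _ (by decide) h6]
    decide

theorem pvFindHead_none (l : String) (h : pvFindHead pvHeads l = none) : pvIsHead l = false := by
  simp only [pvHeads, pvFindHead] at h
  split_ifs at h
  by_contra hh
  have hmem := List.mem_of_elem_eq_true (show pvHeads.contains (PySem.Str.slice l none (some 2)) = true by
    simpa [pvIsHead] using Bool.of_not_eq_false hh)
  simp only [pvHeads, List.mem_cons, List.not_mem_nil, or_false] at hmem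
  rcases hmem with he | he | he | he | he | he <;>
    have hx := pvSlice2_startswith l _ he <;> rw [PySem.Str.startswith_eq] at hx <;>
    simp_all [show ("1.":String).toList = ['1','.'] from rfl, show ("2.":String).toList = ['2','.'] from rfl,
      show ("3.":String).toList = ['3','.'] from rfl, show ("1)":String).toList = ['1',')'] from rfl,
      show ("2)":String).toList = ['2',')'] from rfl, show ("3)":String).toList = ['3',')'] from rfl]
theorem pvDrop_getD (S : List String) (a : Nat) (h : a < S.length) :
    S.drop a = S.getD a "" :: S.drop (a + 1) := by
  rw [List.getD_eq_getElem S "" h]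
  exact List.drop_eq_getElem_cons h

theorem pvScan_trunc (S : List String) (a b : Nat) (hab : a ≤ b) (hb : b < S.length)
    (hne : S.getD b "" ≠ "") (hd : pvDigit0 (S.getD b "") = true) :
    pvScanExpl ((S.drop a).take (b - a)) = pvScanExpl (S.drop a) := by
  induction hd' : b - a generalizing a with
  | zero =>
    have hab' : a = b := by omega
    subst hab'
    rw [List.take_zero, pvDrop_getD S a hb]
    show pvScanExpl [] = pvScanExpl _
    simp only [pvScanExpl]
    rw [if_neg hne, if_pos hd]
  | succ d ih =>
    have ha : a < S.length := by omega
    rw [pvDrop_getD S a ha, List.take_succ_cons]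
    simp only [pvScanExpl]
    by_cases he : S.getD a "" = ""
    · rw [if_pos he, if_pos he]
      have hab2 : a + 1 ≤ b := by omega
      exact ih (a + 1) hab2 (by omega)
    · rw [if_neg he, if_neg he]
theorem pvGetD_map_strip (R : List String) (m : Nat) (h : m < R.length) :
    (R.map PySem.Str.strip).getD m "" = PySem.Str.strip (R.getD m "") := by
  rw [List.getD_eq_getElem _ "" (by simpa using h), List.getD_eq_getElem _ "" h, List.getElem_map]

theorem pvLookA_fst (R : List String) (i j : Nat) :
    (pvLookA R i j).1 = pvScanExpl ((R.map PySem.Str.strip).drop j) := by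
  fun_induction pvLookA R i j with
  | case1 j hj nl hnl ih =>
    rw [ih, pvDrop_getD _ j (by simpa using hj)]
    simp only [pvScanExpl]
    rw [if_pos (by rw [pvGetD_map_strip R j hj]; exact hnl)]
  | case2 j hj nl hnl hd =>
    rw [pvDrop_getD _ j (by simpa using hj)]
    simp only [pvScanExpl]
    rw [if_neg (by rw [pvGetD_map_strip R j hj]; exact hnl), if_pos (by rw [pvGetD_map_strip R j hj]; exact hd)]
  | case3 j hj nl hnl hd =>
    rw [pvDrop_getD _ j (by simpa using hj)]
    simp only [pvScanExpl]
    rw [if_neg (by rw [pvGetD_map_strip R j hj]; exact hnl), if_neg (by rw [pvGetD_map_strip R j hj]; exact hd)]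
    exact (pvGetD_map_strip R j hj).symm
  | case4 j hj =>
    rw [List.drop_of_length_le (by simpa using Nat.le_of_not_lt hj)]
    rfl

theorem pvLookA_snd_spec (R : List String) (i j : Nat) :
    (pvLookA R i j).2 = i ∨
      (j ≤ (pvLookA R i j).2 ∧ (pvLookA R i j).2 < R.length ∧
       PySem.Str.strip (R.getD (pvLookA R i j).2 "") ≠ "" ∧
       pvDigit0 (PySem.Str.strip (R.getD (pvLookA R i j).2 "")) = false ∧
       ∀ m, j ≤ m → m < (pvLookA R i j).2 → PySem.Str.strip (R.getD m "") = "") := by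
  fun_induction pvLookA R i j with
  | case1 j hj nl hnl ih =>
    rcases ih with h | ⟨h1, h2, h3, h4, h5⟩
    · left; exact h
    · right
      refine ⟨by omega, h2, h3, h4, ?_⟩
      intro m hm1 hm2
      rcases Nat.eq_or_lt_of_le hm1 with rfl | hm1'
      · exact hnl
      · exact h5 m (by omega) hm2
  | case2 j hj nl hnl hd => left; rfl
  | case3 j hj nl hnl hd =>
    right
    exact ⟨le_refl j, hj, hnl, by simpa using hd, fun m h1 h2 => absurd h1 (by omega)⟩
  | case4 j hj => left; rfl

theorem pvStartsN_skip (S : List String) (a b : Nat) (hab : a ≤ b)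
    (h : ∀ m, a ≤ m → m < b → pvIsHead (S.getD m "") = false) :
    pvStartsN (S.drop a) a = pvStartsN (S.drop b) b := by
  induction hd : b - a generalizing a with
  | zero => rw [show a = b from by omega]
  | succ d ih =>
    by_cases ha : a < S.length
    · rw [pvDrop_getD S a ha]
      simp only [pvStartsN]
      rw [if_neg (by rw [h a (le_refl a) (by omega)]; simp)]
      exact ih (a + 1) (by omega) (fun m h1 h2 => h m (by omega) h2) (by omega)
    · have hb : S.length ≤ b := by omega
      rw [List.drop_of_length_le (by omega), List.drop_of_length_le hb]
      rfl
theorem pvSegB (S : List String) (l : List Nat)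
    (hmem : ∀ x ∈ l, x < S.length ∧ pvIsHead (S.getD x "") = true)
    (hp : l.Pairwise (· < ·)) :
    pvSegs S (List.zip (l.map (Nat.cast : Nat → Int))
        (PySem.List.slice (l.map (Nat.cast : Nat → Int)) (some 1) none ++ [(S.length : Int)]))
      = pvSegU S l := by
  induction l with
  | nil => rfl
  | cons k rest ih =>
    rw [PySem.List.slice_from_one]
    have hk1 : (k : Int) + 1 = ((k + 1 : Nat) : Int) := by push_cast; ring
    obtain ⟨hkn, hkh⟩ := hmem k (List.mem_cons_self ..)
    cases rest with
    | nil =>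
      simp only [List.map_cons, List.map_nil, List.tail_cons, List.nil_append, List.zip_cons_cons,
        List.zip_nil_right, pvSegs, pvSegU, PySem.List.pyGetD_natCast]
      rw [hk1, PySem.List.slice_natCast]
      rw [List.take_of_length_le (by simp)]
    | cons k2 r2 =>
      have ih' := ih (fun x hx => hmem x (by simp [hx])) (List.Pairwise.sublist (by simp) hp)
      rw [PySem.List.slice_from_one] at ih'
      simp only [List.map_cons, List.tail_cons] at ih'
      simp only [List.map_cons, List.tail_cons, List.cons_append, List.zip_cons_cons,
        pvSegs, pvSegU, PySem.List.pyGetD_natCast]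
      obtain ⟨hk2n, hk2h⟩ := hmem k2 (by simp)
      obtain ⟨hk2ne, hk2d⟩ := pvHead_props _ hk2h
      have hkk2 : k < k2 := (List.pairwise_cons.mp hp).1 k2 (by simp)
      rw [hk1, PySem.List.slice_natCast, pvScan_trunc S (k + 1) k2 (by omega) hk2n hk2ne hk2d, ih']
      rfl
theorem pvIsHead_empty : pvIsHead "" = false := by decide

theorem pvLoopA_eq (R : List String) (i : Nat) :
    pvLoopA R i = pvSegU (R.map PySem.Str.strip) (pvStartsN ((R.map PySem.Str.strip).drop i) i) := by
  fun_induction pvLoopA R i with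
  | case1 i hi line p hp title look ih =>
    obtain ⟨hhead, hlen, hslice⟩ := pvFindHead_some line p hp
    have hmi : i < (R.map PySem.Str.strip).length := by simpa using hi
    have hline : PySem.Str.strip (R.getD i "") = line := rfl
    have hTitle : title = PySem.Str.strip (PySem.Str.slice line (some 2)) := by
      rw [show title = PySem.Str.strip (PySem.Str.slice line (some (PySem.Str.len p))) from rfl, hlen]
    have hlook1 : look.1 = pvScanExpl ((R.map PySem.Str.strip).drop (i + 1)) := pvLookA_fst R i (i + 1)
    rw [pvDrop_getD _ i hmi]
    simp only [pvStartsN]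
    rw [pvGetD_map_strip R i hi, if_pos (show pvIsHead (PySem.Str.strip (R.getD i "")) = true from hhead)]
    simp only [pvSegU]
    rw [pvGetD_map_strip R i hi, hline, ← hTitle, ← hlook1]
    have hrest : pvStartsN ((R.map PySem.Str.strip).drop (i + 1)) (i + 1)
        = pvStartsN ((R.map PySem.Str.strip).drop (look.2 + 1)) (look.2 + 1) := by
      have hlk : (pvLookA R i (i + 1)).2 = look.2 := rfl
      rcases pvLookA_snd_spec R i (i + 1) with h | ⟨h1, h2, h3, h4, h5⟩
      · rw [hlk] at h; rw [h]
      · rw [hlk] at h1 h2 h3 h4 h5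
        apply pvStartsN_skip
        · omega
        · intro m hm1 hm2
          rcases Nat.lt_or_ge m look.2 with hm | hm
          · rw [pvGetD_map_strip R m (by omega), h5 m hm1 hm]
            exact pvIsHead_empty
          · have hmeq : m = look.2 := by omega
            subst hmeq
            rw [pvGetD_map_strip R look.2 (by omega)]
            by_contra hc
            have := (pvHead_props _ (Bool.of_not_eq_false hc)).2
            rw [this] at h4
            exact Bool.true_eq_false.mp h4
    rw [ih, ← hrest]
    by_cases hT : title = ""
    · rw [if_pos hT, if_pos hT, List.nil_append]
    · rw [if_neg hT, if_neg hT, List.singleton_append]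
  | case2 i hi line hp ih =>
    have hmi : i < (R.map PySem.Str.strip).length := by simpa using hi
    rw [pvDrop_getD _ i hmi]
    simp only [pvStartsN]
    rw [pvGetD_map_strip R i hi, if_neg (show ¬ pvIsHead (PySem.Str.strip (R.getD i "")) = true by
      rw [show PySem.Str.strip (R.getD i "") = line from rfl, pvFindHead_none line hp]; simp)]
    exact ih
  | case3 i hi =>
    rw [List.drop_of_length_le (by simpa using Nat.le_of_not_lt hi)]
    rfl
theorem pvAssemble (R : List String) :
    (if pvLoopA R 0 = [] then pvFallbackA R else pvLoopA R 0)
      = (if pvSegs (R.map PySem.Str.strip)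
            (List.zip (((PySem.List.enumerate (R.map PySem.Str.strip)).filter (fun kl => pvIsHead kl.2)).map Prod.fst)
              (PySem.List.slice (((PySem.List.enumerate (R.map PySem.Str.strip)).filter (fun kl => pvIsHead kl.2)).map Prod.fst) (some 1) none
                ++ [((R.map PySem.Str.strip).length : Int)])) = []
         then (R.map PySem.Str.strip).filter (fun l => (l != "") && !pvDigit0 l)
         else pvSegs (R.map PySem.Str.strip)
            (List.zip (((PySem.List.enumerate (R.map PySem.Str.strip)).filter (fun kl => pvIsHead kl.2)).map Prod.fst)
              (PySem.List.slice (((PySem.List.enumerate (R.map PySem.Str.strip)).filter (fun kl => pvIsHead kl.2)).map Prod.fst) (some 1) none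
                ++ [((R.map PySem.Str.strip).length : Int)]))) := by
  have hloop := pvLoopA_eq R 0
  rw [List.drop_zero] at hloop
  have hstarts := pvStarts_cast (R.map PySem.Str.strip) 0
  rw [Nat.cast_zero] at hstarts
  have hseg := pvSegB (R.map PySem.Str.strip) (pvStartsN (R.map PySem.Str.strip) 0)
      (fun x hx => by
        obtain ⟨-, h2, h3⟩ := pvStartsN_mem _ 0 x hx
        rw [Nat.sub_zero] at h2 h3
        exact ⟨h2, h3⟩)
      (pvStartsN_pairwise _ 0)
  rw [hstarts, hseg, hloop, pvFallback_eq]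

-- ===== VERDICT (by name: the statement is the Claim_ definition above) =====
theorem parse_ideas_py_spec : Claim_equal_parse_ideas_py := by
  intro content _
  show parse_ideas_py content = parse_ideas_py_alt content
  simp only [parse_ideas_py, parse_ideas_py_alt]
  exact pvAssemble ((PySem.Str.split? (PySem.Str.strip content) "\n").getD [])
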